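-- pv_equiv track=rewrite | github.com/5hihihi/LogSieve | benchmark/logparser/LogSieve.py | _calc_consecutive_wildcards
-- ===== SOURCE A (Python) =====
-- def _calc_consecutive_wildcards(tokens):
--     """连续通配符计算（原逻辑封装）"""
--     max_consecutive = current_streak = consecutive_counts = 0
--     for token in tokens:
--         if token == '<*>':
--             current_streak += 1
--             if current_streak >= 2:
--                 consecutive_counts += 1
--             max_consecutive = max(max_consecutive, current_streak)
--         else:
--             current_streak = 0
--     return max_consecutive, consecutive_counts
-- ===== SOURCE B (Python) =====
-- from itertools import groupby
--
-- def _calc_consecutive_wildcards(tokens):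
--     """Group tokens into maximal runs, keep the lengths of '<*>' runs, then aggregate."""
--     lengths = [sum(1 for _ in g) for k, g in groupby(tokens) if k == '<*>']
--     return max(lengths, default=0), sum(L - 1 for L in lengths)
-- ===== Notes on version B (the rewrite author's own statement) =====
-- stated objective: simpler
-- what changed: Replaces the single-accumulator streak scan with a build-runs-then-aggregate decomposition: groupby splits the tokens into maximal runs, wildcard run lengths are collected, and the answers are max(lengths, default=0) and sum(L-1).
import Mathlib
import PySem

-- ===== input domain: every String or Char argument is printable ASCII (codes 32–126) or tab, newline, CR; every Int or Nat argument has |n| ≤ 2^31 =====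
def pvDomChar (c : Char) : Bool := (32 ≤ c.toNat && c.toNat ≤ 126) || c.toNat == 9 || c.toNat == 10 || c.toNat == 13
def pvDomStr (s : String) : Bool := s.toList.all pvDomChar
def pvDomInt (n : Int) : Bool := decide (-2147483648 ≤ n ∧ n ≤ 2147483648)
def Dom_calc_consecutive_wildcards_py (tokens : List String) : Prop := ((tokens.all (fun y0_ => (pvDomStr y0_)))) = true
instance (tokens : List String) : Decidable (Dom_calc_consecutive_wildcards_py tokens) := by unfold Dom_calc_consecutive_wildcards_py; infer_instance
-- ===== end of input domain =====

-- B replaces A's single-accumulator streak scan by a build-runs-then-aggregate decomposition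
-- (groupby into maximal runs, then max of the wildcard run lengths and sum of (L-1)); same cost, simpler.

-- ===== PORT A =====
-- the for-loop, carrying (max_consecutive, current_streak, consecutive_counts)
def pvLoopA (st : Int × Int × Int) : List String → Int × Int × Int
  | [] => st
  | t :: ts =>
    if t = "<*>" then
      let s := st.2.1 + 1
      let c := if 2 ≤ s then st.2.2 + 1 else st.2.2
      pvLoopA (max st.1 s, s, c) ts
    else
      pvLoopA (st.1, 0, st.2.2) ts

def calc_consecutive_wildcards_py (tokens : List String) : Int × Int :=
  let st := pvLoopA (0, 0, 0) tokens
  (st.1, st.2.2)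

-- ===== PORT B =====
-- itertools.groupby: lengths of the maximal runs whose key is '<*>', in order
def pvWildRuns : List String → List Int
  | [] => []
  | t :: ts =>
    if t = "<*>" then ((ts.takeWhile (fun x => x == t)).length + 1 : Int) :: pvWildRuns (ts.dropWhile (fun x => x == t))
    else pvWildRuns (ts.dropWhile (fun x => x == t))
termination_by l => l.length
decreasing_by all_goals simpa using Nat.lt_succ_of_le (List.length_dropWhile_le _ _)

def calc_consecutive_wildcards_py_alt (tokens : List String) : Int × Int :=
  let lengths := pvWildRuns tokens
  (lengths.foldl max 0, (lengths.map (· - 1)).sum)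

-- ===== PRECONDITION & SPEC =====
def Spec_calc_consecutive_wildcards_py (tokens : List String) (out : Int × Int) : Prop := out = calc_consecutive_wildcards_py_alt tokens
instance (tokens : List String) (out : Int × Int) : Decidable (Spec_calc_consecutive_wildcards_py tokens out) := by unfold Spec_calc_consecutive_wildcards_py; infer_instance

-- ===== CLAIM (what is proved, stated in full; the proofs are below) =====
def Claim_equal_calc_consecutive_wildcards_py : Prop := ∀ (tokens : List String), Dom_calc_consecutive_wildcards_py tokens → Spec_calc_consecutive_wildcards_py tokens (calc_consecutive_wildcards_py tokens)

-- ===== LEMMAS AND PROOFS =====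

-- a run of non-wildcard tokens leaves the state (m, 0, c) unchanged
lemma pvLoopA_skip (l : List String) (hl : ∀ x ∈ l, x ≠ "<*>") (rest : List String) (m c : Int) :
    pvLoopA (m, 0, c) (l ++ rest) = pvLoopA (m, 0, c) rest := by
  induction l with
  | nil => rfl
  | cons x l ih =>
    have hx : x ≠ "<*>" := hl x (by simp)
    simp only [List.cons_append, pvLoopA, if_neg hx]
    exact ih (fun y hy => hl y (by simp [hy]))

-- a run of wildcard tokens entered with streak s (1 ≤ s ≤ m) advances the state arithmetically
lemma pvLoopA_run (l : List String) (hl : ∀ x ∈ l, x = "<*>") :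
    ∀ (rest : List String) (m s c : Int), 1 ≤ s → s ≤ m →
    pvLoopA (m, s, c) (l ++ rest) =
      pvLoopA (max m (s + l.length), s + l.length, c + l.length) rest := by
  induction l with
  | nil =>
    intro rest m s c _ hm
    simp [max_eq_left hm]
  | cons x l ih =>
    intro rest m s c hs hm
    have hx : x = "<*>" := hl x (by simp)
    simp only [List.cons_append, pvLoopA, if_pos hx, if_pos (by omega : (2:Int) ≤ s + 1)]
    rw [ih (fun y hy => hl y (by simp [hy])) rest _ _ _ (by omega) (le_max_right _ _)]
    have h2 : s + 1 + (l.length : Int) = s + ((l.length : Int) + 1) := by ring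
    have h3 : c + 1 + (l.length : Int) = c + ((l.length : Int) + 1) := by ring
    simp [h2, h3]

-- every token of a takeWhile (· == t) run equals t
lemma pv_takeWhile_mem {t : String} {ts l : List String} (h : l = ts.takeWhile (fun x => x == t)) :
    ∀ x ∈ l, x = t := by
  intro x hx
  have := List.mem_takeWhile_imp (h ▸ hx)
  exact eq_of_beq this

-- unfolding one loop step on a wildcard token with streak 0
lemma pvLoopA_wild_zero (m c : Int) (l : List String) :
    pvLoopA (m, 0, c) ("<*>" :: l) = pvLoopA (max m 1, 1, c) l := by
  norm_num [pvLoopA]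

-- head of a non-empty dropWhile fails the predicate
lemma pv_dropWhile_head_not (p : String → Bool) (l : List String) (x : String) (xs : List String)
    (h : l.dropWhile p = x :: xs) : p x = false := by
  have hne : l.dropWhile p ≠ [] := by simp [h]
  have := List.head_dropWhile_not p hne
  simpa [h] using this

-- main invariant: A's loop started at (m, 0, c) computes B's run aggregation
lemma pvMain : ∀ (n : Nat) (ts : List String), ts.length ≤ n → ∀ (m c : Int),
    ((pvLoopA (m, 0, c) ts).1, (pvLoopA (m, 0, c) ts).2.2) =
      ((pvWildRuns ts).foldl max m, c + ((pvWildRuns ts).map (· - 1)).sum) := by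
  intro n
  induction n with
  | zero =>
    intro ts hts m c
    have : ts = [] := List.eq_nil_of_length_eq_zero (Nat.le_zero.mp hts)
    subst this
    simp [pvLoopA, pvWildRuns]
  | succ n ih =>
    intro ts hts m c
    cases ts with
    | nil => simp [pvLoopA, pvWildRuns]
    | cons t ts =>
      have hsplit : ts.takeWhile (fun x => x == t) ++ ts.dropWhile (fun x => x == t) = ts :=
        List.takeWhile_append_dropWhile
      have hrest_len : (ts.dropWhile (fun x => x == t)).length ≤ n := by
        have := List.length_dropWhile_le (fun x => x == t) ts
        simp at hts; omega
      by_cases ht : t = "<*>"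
      · subst ht
        have hl : ∀ x ∈ ts.takeWhile (fun x => x == "<*>"), x = "<*>" := pv_takeWhile_mem rfl
        have hL : pvLoopA (m, 0, c) ("<*>" :: ts) =
            pvLoopA (max (max m 1) (1 + ((ts.takeWhile (fun x => x == "<*>")).length : Int)),
                     1 + ((ts.takeWhile (fun x => x == "<*>")).length : Int),
                     c + ((ts.takeWhile (fun x => x == "<*>")).length : Int))
              (ts.dropWhile (fun x => x == "<*>")) := by
          conv_lhs => rw [← hsplit]
          rw [pvLoopA_wild_zero, pvLoopA_run _ hl _ _ _ _ le_rfl (le_max_right _ _)]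
        have hruns : pvWildRuns ("<*>" :: ts) =
            (((ts.takeWhile (fun x => x == "<*>")).length : Int) + 1)
              :: pvWildRuns (ts.dropWhile (fun x => x == "<*>")) := by
          simp [pvWildRuns]
        rw [hL, hruns]
        have hmax : max (max m 1) (1 + ((ts.takeWhile (fun x => x == "<*>")).length : Int)) =
            max m (((ts.takeWhile (fun x => x == "<*>")).length : Int) + 1) := by
          have : (0:Int) ≤ ((ts.takeWhile (fun x => x == "<*>")).length : Int) := Int.natCast_nonneg _
          omega
        cases hr : ts.dropWhile (fun x => x == "<*>") with
        | nil =>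
          simp [pvLoopA, pvWildRuns]
          omega
        | cons r rest' =>
          have hrne : r ≠ "<*>" := by simpa using pv_dropWhile_head_not _ _ _ _ hr
          have hstep : pvLoopA (max (max m 1) (1 + ((ts.takeWhile (fun x => x == "<*>")).length : Int)),
                     1 + ((ts.takeWhile (fun x => x == "<*>")).length : Int),
                     c + ((ts.takeWhile (fun x => x == "<*>")).length : Int)) (r :: rest')
              = pvLoopA (max (max m 1) (1 + ((ts.takeWhile (fun x => x == "<*>")).length : Int)), 0,
                     c + ((ts.takeWhile (fun x => x == "<*>")).length : Int)) (r :: rest') := by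
            simp [pvLoopA, hrne]
          rw [hstep, ih (r :: rest') (hr ▸ hrest_len) _ _, hmax]
          simp [List.foldl_cons]
          ring
      · have hl : ∀ x ∈ ts.takeWhile (fun x => x == t), x ≠ "<*>" := by
          intro x hx
          rw [pv_takeWhile_mem rfl x hx]; exact ht
        have hL : pvLoopA (m, 0, c) (t :: ts) = pvLoopA (m, 0, c) (ts.dropWhile (fun x => x == t)) := by
          conv_lhs => rw [← hsplit]
          simp only [pvLoopA, if_neg ht]
          exact pvLoopA_skip _ hl _ _ _
        have hruns : pvWildRuns (t :: ts) = pvWildRuns (ts.dropWhile (fun x => x == t)) := by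
          simp [pvWildRuns, if_neg ht]
        rw [hL, hruns]
        exact ih _ hrest_len m c

-- ===== VERDICT (by name: the statement is the Claim_ definition above) =====
theorem calc_consecutive_wildcards_py_spec : Claim_equal_calc_consecutive_wildcards_py := by
  intro tokens _
  unfold Spec_calc_consecutive_wildcards_py calc_consecutive_wildcards_py calc_consecutive_wildcards_py_alt
  have := pvMain tokens.length tokens le_rfl 0 0
  simp only [zero_add] at this
  simpa using this
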